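-- pv_equiv track=rewrite | github.com/Dysk1ddy/swordcoast | dnd_game/ui/kivy_markup.py | kivy_dice_highlight_index
-- ===== SOURCE A (Python) =====
-- def kivy_dice_highlight_index(rolls: list[int], kept: int | None = None) -> int | None:
--     if not rolls:
--         return None
--     if kept is not None:
--         for index, value in enumerate(rolls):
--             if value == kept:
--                 return index
--     return max(range(len(rolls)), key=lambda index: rolls[index])
-- ===== SOURCE B (Python) =====
-- def kivy_dice_highlight_index(rolls: list[int], kept: int | None = None) -> int | None:
--     if not rolls:
--         return None
--     best = 0
--     best_val = rolls[0]
--     for index, value in enumerate(rolls):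
--         if kept is not None and value == kept:
--             return index
--         if value > best_val:
--             best = index
--             best_val = value
--     return best
-- ===== Notes on version B (the rewrite author's own statement) =====
-- stated objective: alternative
-- what changed: Fused A's separate kept-search loop and the subsequent max-over-indices scan into a single pass that returns on the first kept match and otherwise tracks the first-occurrence argmax with a strict comparison (one traversal, no index-keyed max call).
import Mathlib
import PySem

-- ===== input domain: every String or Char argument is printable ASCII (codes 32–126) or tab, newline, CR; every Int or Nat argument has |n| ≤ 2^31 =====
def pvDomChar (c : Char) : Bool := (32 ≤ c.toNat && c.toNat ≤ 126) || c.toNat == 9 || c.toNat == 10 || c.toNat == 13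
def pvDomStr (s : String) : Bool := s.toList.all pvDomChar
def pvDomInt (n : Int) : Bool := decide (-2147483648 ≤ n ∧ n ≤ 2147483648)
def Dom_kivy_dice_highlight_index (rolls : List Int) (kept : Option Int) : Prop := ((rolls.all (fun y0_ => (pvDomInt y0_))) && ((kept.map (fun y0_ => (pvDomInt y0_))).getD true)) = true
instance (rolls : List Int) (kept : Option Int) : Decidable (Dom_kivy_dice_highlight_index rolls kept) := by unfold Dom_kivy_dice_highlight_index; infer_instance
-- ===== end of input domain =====

-- B fuses A's kept-search loop and subsequent max-over-indices scan into one pass (alternative decomposition, same O(n) cost).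

-- ===== PORT A =====
-- the 'for index, value in enumerate(rolls): if value == kept: return index' loop
def pvFindK : List Int → Int → Int → Option Int
  | [], _, _ => none
  | v :: rest, i, k => if v = k then some i else pvFindK rest (i + 1) k

-- Python's max(range(len(rolls)), key=lambda index: rolls[index]): first index with
-- strictly greatest key wins; transliterated as the scan max performs over the range.
def pvMaxIdx (rolls : List Int) : List Int → Int → Int
  | [], best => best
  | j :: rest, best =>
    if PySem.List.pyGetD rolls j 0 > PySem.List.pyGetD rolls best 0 then
      pvMaxIdx rolls rest j
    else
      pvMaxIdx rolls rest best

def kivy_dice_highlight_index (rolls : List Int) (kept : Option Int) : Option Int :=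
  match rolls with
  | [] => none
  | _ :: _ =>
    match (match kept with | some k => pvFindK rolls 0 k | none => none) with
    | some i => some i
    | none => some (pvMaxIdx rolls (PySem.List.pyRange 0 rolls.length 1) 0)

-- ===== PORT B =====
-- single pass: return on first kept match, otherwise track first-occurrence argmax
def pvAltLoop (kept : Option Int) : List Int → Int → Int → Int → Int
  | [], _, best, _ => best
  | v :: rest, i, best, bestVal =>
    if kept = some v then i
    else if v > bestVal then pvAltLoop kept rest (i + 1) i v
    else pvAltLoop kept rest (i + 1) best bestVal

def kivy_dice_highlight_index_alt (rolls : List Int) (kept : Option Int) : Option Int :=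
  match rolls with
  | [] => none
  | v0 :: _ => some (pvAltLoop kept rolls 0 0 v0)

-- ===== PRECONDITION & SPEC =====
def Spec_kivy_dice_highlight_index (rolls : List Int) (kept : Option Int) (out : Option Int) : Prop := out = kivy_dice_highlight_index_alt rolls kept
instance (rolls : List Int) (kept : Option Int) (out : Option Int) : Decidable (Spec_kivy_dice_highlight_index rolls kept out) := by unfold Spec_kivy_dice_highlight_index; infer_instance

-- ===== CLAIM (what is proved, stated in full; the proofs are below) =====
def Claim_equal_kivy_dice_highlight_index : Prop := ∀ (rolls : List Int) (kept : Option Int), Dom_kivy_dice_highlight_index rolls kept → Spec_kivy_dice_highlight_index rolls kept (kivy_dice_highlight_index rolls kept)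

-- ===== LEMMAS AND PROOFS =====

-- B's fused loop with a kept value splits into A's search followed by the pure argmax loop
theorem pvAltLoop_some (l : List Int) : ∀ (i b bv k : Int),
    pvAltLoop (some k) l i b bv =
      match pvFindK l i k with
      | some j => j
      | none => pvAltLoop none l i b bv := by
  induction l with
  | nil => intro i b bv k; simp [pvAltLoop, pvFindK]
  | cons v rest ih =>
    intro i b bv k
    by_cases hk : v = k
    · subst hk; simp [pvAltLoop, pvFindK]
    · have hk' : ¬ (k = v) := fun h => hk h.symm
      simp only [pvAltLoop, pvFindK, if_neg hk, Option.some.injEq, if_neg hk',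
        reduceCtorEq]
      by_cases hgt : v > bv
      · rw [if_pos hgt, ih]; simp only [if_pos hgt, if_false]
      · rw [if_neg hgt, ih]; simp only [if_neg hgt, if_false]

-- A's argmax scan over range(i, len) equals B's keptless loop over the suffix drop i
theorem pvMaxIdx_eq (rolls : List Int) : ∀ (l : List Int) (i b bv : Int),
    0 ≤ i → rolls.drop i.toNat = l → 0 ≤ b → b < rolls.length →
    PySem.List.pyGetD rolls b 0 = bv →
    pvMaxIdx rolls (PySem.List.pyRange i rolls.length 1) b = pvAltLoop none l i b bv := by
  intro l
  induction l with
  | nil =>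
    intro i b bv hi hdrop _ _ _
    have hlen : (rolls.length : Int) ≤ i := by
      have := List.drop_eq_nil_iff.mp hdrop
      omega
    rw [PySem.List.pyRange_one_eq_nil hlen]
    simp [pvMaxIdx, pvAltLoop]
  | cons v rest ih =>
    intro i b bv hi hdrop hb hblen hbv
    have hlt : i.toNat < rolls.length := by
      by_contra h
      rw [List.drop_eq_nil_of_le (by omega)] at hdrop
      exact List.cons_ne_nil v rest hdrop.symm
    have hilt : i < (rolls.length : Int) := by omega
    have hv : rolls[i.toNat] = v := by
      have h0 : (rolls.drop i.toNat)[0]'(by rw [hdrop]; simp) = v := by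
        simp [hdrop]
      simpa using h0
    have hgetI : PySem.List.pyGetD rolls i 0 = v := by
      rw [PySem.List.pyGetD_eq_getElem rolls 0 hi hilt, hv]
    have hdrop' : rolls.drop (i + 1).toNat = rest := by
      have : (i + 1).toNat = i.toNat + 1 := by omega
      rw [this, ← List.drop_drop]
      simp [hdrop]
    rw [PySem.List.pyRange_one_cons hilt]
    simp only [pvMaxIdx, pvAltLoop, hgetI, hbv,
      if_neg (fun h : (none : Option Int) = some v => by cases h)]
    by_cases hgt : v > bv
    · rw [if_pos hgt, if_pos hgt]
      exact ih (i + 1) i v (by omega) hdrop' hi hilt hgetI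
    · rw [if_neg hgt, if_neg hgt]
      exact ih (i + 1) b bv (by omega) hdrop' hb hblen hbv

-- ===== VERDICT (by name: the statement is the Claim_ definition above) =====
theorem kivy_dice_highlight_index_spec : Claim_equal_kivy_dice_highlight_index := by
  intro rolls kept _
  unfold Spec_kivy_dice_highlight_index kivy_dice_highlight_index kivy_dice_highlight_index_alt
  match rolls with
  | [] => rfl
  | v0 :: rest =>
    have hget0 : PySem.List.pyGetD (v0 :: rest) (0 : Int) 0 = v0 := by
      simp [PySem.List.pyGetD_zero_cons]
    have hmax := pvMaxIdx_eq (v0 :: rest) (v0 :: rest) 0 0 v0 (by omega) (by simp)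
      (by omega) (by simp) hget0
    match kept with
    | none => simpa using hmax
    | some k =>
      simp only [pvAltLoop_some]
      cases h : pvFindK (v0 :: rest) 0 k with
      | some j => simp
      | none => simp only [hmax]
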